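-- pv_equiv track=rewrite | github.com/Dacops/UniProjects | AulasPráticas/L5/Exercícios/ex5_7.py | multiplica_mat
-- ===== SOURCE A (Python) =====
-- def multiplica_mat(m1, m2):
--     m_t1, m_t2, m_t3, count = [], [], [], 0
--     for v in range(len(m1)):
--         for n_lin in range(len(m1)):
--             m = []
--             for n_col in range(len(m1)):
--                 m.append(m1[n_col][n_lin]*m2[n_lin][v])
--
--             if count%3==0:
--                 m_t1.append(m)
--             if (count-1)%3==0:
--                 m_t2.append(m)
--             if (count-2)%3==0:
--                 m_t3.append(m)
--
--             count+=1
--     return m_t1, m_t2, m_t3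
-- ===== SOURCE B (Python) =====
-- def multiplica_mat(m1, m2):
--     n = len(m1)
--     cols = [[row[j] for row in m1] for j in range(n)]
--
--     def vec(k):
--         v, n_lin = divmod(k, n)
--         s = m2[n_lin][v]
--         return [x * s for x in cols[n_lin]]
--
--     nn = n * n
--     return ([vec(k) for k in range(0, nn, 3)],
--             [vec(k) for k in range(1, nn, 3)],
--             [vec(k) for k in range(2, nn, 3)])
-- ===== Notes on version B (the rewrite author's own statement) =====
-- stated objective: alternative
-- what changed: B precomputes the columns of m1 once (a transpose cache), recovers (v, n_lin) from the flat position k by divmod(k, n), and fills each of the three output lists in its own independent strided pass k = t, t+3, ... over positions, scaling the cached column by m2[n_lin][v]; there is no running counter, no mod-3 branching and no intermediate flat list.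
import Mathlib
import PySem

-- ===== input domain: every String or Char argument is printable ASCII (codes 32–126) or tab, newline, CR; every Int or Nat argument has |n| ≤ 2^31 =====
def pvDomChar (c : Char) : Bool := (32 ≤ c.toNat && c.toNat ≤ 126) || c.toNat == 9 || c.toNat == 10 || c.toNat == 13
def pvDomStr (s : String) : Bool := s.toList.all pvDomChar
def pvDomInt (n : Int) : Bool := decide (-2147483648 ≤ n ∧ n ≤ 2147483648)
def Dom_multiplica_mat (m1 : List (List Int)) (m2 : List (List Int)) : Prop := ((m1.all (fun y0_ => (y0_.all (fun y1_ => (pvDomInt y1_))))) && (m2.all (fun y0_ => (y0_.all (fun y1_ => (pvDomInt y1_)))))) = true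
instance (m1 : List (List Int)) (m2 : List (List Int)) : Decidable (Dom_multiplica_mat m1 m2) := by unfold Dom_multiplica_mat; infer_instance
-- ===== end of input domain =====

-- B precomputes m1's columns once, recovers (v, n_lin) from the flat position k by divmod(k, n),
-- and fills each of the three output lists in its own strided pass (objective: alternative; same cost).

-- ===== PORT A =====
-- A's inner n_col loop (m = []; m.append(...)); indices are in range under Pre_, default unreachable there
def pvRowA (m1 m2 : List (List Int)) (v n_lin : Int) : List Int :=
  (PySem.List.pyRange 0 m1.length 1).foldl
    (fun m n_col => m ++ [PySem.List.pyGetD (PySem.List.pyGetD m1 n_col []) n_lin 0 *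
                          PySem.List.pyGetD (PySem.List.pyGetD m2 n_lin []) v 0]) []

-- A's three mod-tests and count increment (the body after building m)
def pvDealA (st : List (List Int) × List (List Int) × List (List Int) × Int) (m : List Int) :
    List (List Int) × List (List Int) × List (List Int) × Int :=
  let t1 := if PySem.Int.mod st.2.2.2 3 == 0 then st.1 ++ [m] else st.1
  let t2 := if PySem.Int.mod (st.2.2.2 - 1) 3 == 0 then st.2.1 ++ [m] else st.2.1
  let t3 := if PySem.Int.mod (st.2.2.2 - 2) 3 == 0 then st.2.2.1 ++ [m] else st.2.2.1
  (t1, t2, t3, st.2.2.2 + 1)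

def multiplica_mat (m1 : List (List Int)) (m2 : List (List Int)) :
    List (List Int) × List (List Int) × List (List Int) :=
  let st := (PySem.List.pyRange 0 m1.length 1).foldl
    (fun st v => (PySem.List.pyRange 0 m1.length 1).foldl
      (fun st n_lin => pvDealA st (pvRowA m1 m2 v n_lin)) st)
    ([], [], [], 0)
  (st.1, st.2.1, st.2.2.1)

-- ===== PORT B =====
-- Source B's 'cols': the list of columns of m1 (a transpose cache)
def pvCols (m1 : List (List Int)) : List (List Int) :=
  (PySem.List.pyRange 0 m1.length 1).map
    (fun j => m1.map (fun row => PySem.List.pyGetD row j 0))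

-- Source B's 'vec(k)': v, n_lin = divmod(k, n); scale column n_lin by m2[n_lin][v]
def pvVec (m1 m2 : List (List Int)) (k : Int) : List Int :=
  match PySem.Int.divmod? k m1.length with
  | some (v, n_lin) =>
      let s := PySem.List.pyGetD (PySem.List.pyGetD m2 n_lin []) v 0
      (PySem.List.pyGetD (pvCols m1) n_lin []).map (fun x => x * s)
  | none => []   -- divmod(k, 0) never happens: vec is only called when range(t, n*n, 3) is nonempty, so n > 0

def multiplica_mat_alt (m1 : List (List Int)) (m2 : List (List Int)) :
    List (List Int) × List (List Int) × List (List Int) :=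
  let nn : Int := (m1.length : Int) * (m1.length : Int)
  ((PySem.List.pyRange 0 nn 3).map (pvVec m1 m2),
   (PySem.List.pyRange 1 nn 3).map (pvVec m1 m2),
   (PySem.List.pyRange 2 nn 3).map (pvVec m1 m2))

-- ===== PRECONDITION & SPEC =====
-- Pre_: exactly where Python A returns (no IndexError): every row of m1 has ≥ len(m1) entries,
-- m2 has ≥ len(m1) rows and its first len(m1) rows have ≥ len(m1) entries.
def Pre_multiplica_mat (m1 : List (List Int)) (m2 : List (List Int)) : Prop :=
  (∀ r ∈ m1, m1.length ≤ r.length) ∧ m1.length ≤ m2.length ∧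
  ∀ r ∈ m2.take m1.length, m1.length ≤ r.length
instance (m1 : List (List Int)) (m2 : List (List Int)) : Decidable (Pre_multiplica_mat m1 m2) := by
  unfold Pre_multiplica_mat; infer_instance
def pvWitness_multiplica_mat : List (List Int) × List (List Int) :=
  ([[1, 2], [3, 4]], [[5, 6], [7, 8]])

def Spec_multiplica_mat (m1 : List (List Int)) (m2 : List (List Int))
    (out : List (List Int) × List (List Int) × List (List Int)) : Prop :=
  out = multiplica_mat_alt m1 m2
instance (m1 : List (List Int)) (m2 : List (List Int))
    (out : List (List Int) × List (List Int) × List (List Int)) :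
    Decidable (Spec_multiplica_mat m1 m2 out) := by unfold Spec_multiplica_mat; infer_instance

-- ===== CLAIM (what is proved, stated in full; the proofs are below) =====
def Claim_equal_multiplica_mat : Prop := ∀ (m1 : List (List Int)) (m2 : List (List Int)),
  Dom_multiplica_mat m1 m2 → Pre_multiplica_mat m1 m2 →
  Spec_multiplica_mat m1 m2 (multiplica_mat m1 m2)

-- ===== LEMMAS AND PROOFS =====

-- the stride-3 sublist (proof tool: characterises what A's mod-3 dealer builds)
def pvEvery3 {α : Type} : List α → List α
  | [] => []
  | x :: rest => x :: pvEvery3 (rest.drop 2)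
termination_by l => l.length
decreasing_by simp

-- the k-th product vector, k = v*n + n_lin flattened
def pvIdxRow (m1 m2 : List (List Int)) (k : Nat) : List Int :=
  pvRowA m1 m2 (↑(k / m1.length)) (↑(k % m1.length))

theorem pvEvery3_nil {α : Type} : pvEvery3 ([] : List α) = [] := by
  rw [pvEvery3.eq_def]

theorem pvEvery3_cons {α : Type} (x : α) (rest : List α) :
    pvEvery3 (x :: rest) = x :: pvEvery3 (rest.drop 2) := by
  rw [pvEvery3.eq_def]

-- a doubly nested fold that consumes f v y is the fold over the flattened list of the f v y
theorem foldl_nest {α β γ σ : Type} (l1 : List α) (l2 : List β) (g : σ → γ → σ)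
    (f : α → β → γ) (s : σ) :
    l1.foldl (fun s v => l2.foldl (fun s y => g s (f v y)) s) s =
      (l1.flatMap (fun v => l2.map (f v))).foldl g s := by
  induction l1 generalizing s with
  | nil => rfl
  | cons a l1 ih => simp [List.foldl_append, List.foldl_map, ih]

-- A's dealer, run from any count c, appends the three stride-3 sublists of L to the accumulators
theorem deal_spec (L : List (List Int)) (t1 t2 t3 : List (List Int)) (c : Nat) :
    L.foldl pvDealA (t1, t2, t3, (c : Int)) =
      (t1 ++ pvEvery3 (L.drop ((3 - c % 3) % 3)),
       t2 ++ pvEvery3 (L.drop ((4 - c % 3) % 3)),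
       t3 ++ pvEvery3 (L.drop ((5 - c % 3) % 3)),
       (c : Int) + L.length) := by
  induction L generalizing t1 t2 t3 c with
  | nil => simp [pvEvery3_nil]
  | cons x rest ih =>
    have hc : ((c : Int) + 1) = ((c + 1 : Nat) : Int) := by push_cast; ring
    rcases (by omega : c % 3 = 0 ∨ c % 3 = 1 ∨ c % 3 = 2) with h | h | h
    · have b1 : (PySem.Int.mod (c : Int) 3 == 0) = true := by simp; omega
      have b2 : (PySem.Int.mod ((c : Int) - 1) 3 == 0) = false := by simp; omega
      have b3 : (PySem.Int.mod ((c : Int) - 2) 3 == 0) = false := by simp; omega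
      simp only [List.foldl_cons, pvDealA, b1, b2, b3, if_true, hc, ih]
      have hmod : (c + 1) % 3 = 1 := by omega
      simp [hmod, h, pvEvery3_cons, List.append_assoc]
      omega
    · have b1 : (PySem.Int.mod (c : Int) 3 == 0) = false := by simp; omega
      have b2 : (PySem.Int.mod ((c : Int) - 1) 3 == 0) = true := by simp; omega
      have b3 : (PySem.Int.mod ((c : Int) - 2) 3 == 0) = false := by simp; omega
      simp only [List.foldl_cons, pvDealA, b1, b2, b3, if_true, hc, ih]
      have hmod : (c + 1) % 3 = 2 := by omega
      simp [hmod, h, pvEvery3_cons, List.append_assoc]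
      omega
    · have b1 : (PySem.Int.mod (c : Int) 3 == 0) = false := by simp; omega
      have b2 : (PySem.Int.mod ((c : Int) - 1) 3 == 0) = false := by simp; omega
      have b3 : (PySem.Int.mod ((c : Int) - 2) 3 == 0) = true := by simp; omega
      simp only [List.foldl_cons, pvDealA, b1, b2, b3, if_true, hc, ih]
      have hmod : (c + 1) % 3 = 0 := by omega
      simp [hmod, h, pvEvery3_cons, List.append_assoc]
      omega

-- flattening a v,y double loop into a single k loop with divmod
theorem flat_idx {α : Type} (g : Nat → Nat → α) (n : Nat) (a : Nat) :
    (List.range a).flatMap (fun v => (List.range n).map (g v)) =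
      (List.range (a * n)).map (fun k => g (k / n) (k % n)) := by
  induction a with
  | zero => simp
  | succ a ih =>
    rw [List.range_succ, List.flatMap_append, ih, Nat.succ_mul, List.range_add,
        List.map_append, List.map_map]
    simp only [List.flatMap_cons, List.flatMap_nil, List.append_nil]
    congr 1
    apply List.map_congr_left
    intro j hj
    have hjn : j < n := List.mem_range.mp hj
    have hn : 0 < n := by omega
    simp only [Function.comp_apply]
    have h1 : (a * n + j) / n = a := by
      rw [Nat.add_comm, Nat.mul_comm, Nat.add_mul_div_left _ _ hn, Nat.div_eq_of_lt hjn, Nat.zero_add]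
    have h2 : (a * n + j) % n = j := by
      rw [Nat.add_comm, Nat.mul_comm, Nat.add_mul_mod_self_left, Nat.mod_eq_of_lt hjn]
    rw [h1, h2]

-- pvEvery3 picks out the elements at positions 0, 3, 6, …
theorem every3_getD (M : List (List Int)) :
    pvEvery3 M = (List.range ((M.length + 2) / 3)).map (fun i => M.getD (3 * i) []) := by
  induction M using pvEvery3.induct with
  | case1 => simp [pvEvery3_nil]
  | case2 x rest ih =>
    rw [pvEvery3_cons, ih]
    have hdl : (rest.drop 2).length = rest.length - 2 := by simp
    rw [hdl]
    have h1 : (rest.length - 2 + 2) / 3 = rest.length / 3 := by omega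
    have h2 : (x :: rest).length + 2 = rest.length / 3 * 3 + (rest.length % 3 + 3) := by
      simp; omega
    rw [h1, h2, show (rest.length / 3 * 3 + (rest.length % 3 + 3)) / 3
          = rest.length / 3 + 1 from by omega,
        List.range_succ_eq_map, List.map_cons, List.map_map]
    congr 1
    apply List.map_congr_left
    intro i _
    simp only [Function.comp_apply, Nat.succ_eq_add_one]
    rw [show 3 * (i + 1) = (3 * i + 2) + 1 from by ring, List.getD_cons_succ]
    simp [List.getD, List.getElem?_drop, Nat.add_comm 2 (3 * i)]

-- a map over a list equals the map over its indices
theorem map_getD_range {α β : Type} (l : List α) (d : α) (G : α → β) :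
    (List.range l.length).map (fun c => G (l.getD c d)) = l.map G := by
  induction l with
  | nil => rfl
  | cons a l ih =>
    rw [List.length_cons, List.range_succ_eq_map, List.map_cons, List.map_map,
        List.map_cons, ← ih]
    congr 1

-- B's vec(k) is A's product vector for v = k / n, n_lin = k % n
-- A's inner loop over column indices is the same map over m1's rows
theorem pvRowA_map (m1 m2 : List (List Int)) (v y : Int) :
    pvRowA m1 m2 v y = m1.map (fun row => PySem.List.pyGetD row y 0 *
      PySem.List.pyGetD (PySem.List.pyGetD m2 y []) v 0) := by
  unfold pvRowA
  rw [PySem.List.foldl_append_singleton_eq_map, List.nil_append,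
      PySem.List.pyRange_zero_natCast, List.map_map,
      ← map_getD_range m1 [] (fun row => PySem.List.pyGetD row y 0 *
        PySem.List.pyGetD (PySem.List.pyGetD m2 y []) v 0)]
  apply List.map_congr_left
  intro c _
  simp [Function.comp, PySem.List.pyGetD_natCast]

-- B's vec(k) is A's product vector for v = k / n, n_lin = k % n
theorem pvVec_eq (m1 m2 : List (List Int)) (kn : Nat) (hk : kn < m1.length * m1.length) :
    pvVec m1 m2 (↑kn) = pvIdxRow m1 m2 kn := by
  have hn : 0 < m1.length := by
    rcases Nat.eq_zero_or_pos m1.length with h | h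
    · simp [h] at hk
    · exact h
  have hdm : PySem.Int.divmod? (↑kn) (↑m1.length)
      = some (↑(kn / m1.length), ↑(kn % m1.length)) := by
    simp [PySem.Int.divmod?, Int.fdiv_eq_ediv, Int.fmod_eq_emod,
      show (0:Int) ≤ ↑m1.length by positivity]
    exact List.ne_nil_of_length_pos hn
  have hy : kn % m1.length < m1.length := Nat.mod_lt _ hn
  have hcol : PySem.List.pyGetD (pvCols m1) (↑(kn % m1.length)) []
      = m1.map (fun row => PySem.List.pyGetD row (↑(kn % m1.length)) 0) := by
    unfold pvCols
    rw [PySem.List.pyRange_zero_natCast, List.map_map, PySem.List.pyGetD_natCast,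
        PySem.List.getD_map_range _ _ _ _ hy]
    rfl
  unfold pvVec pvIdxRow
  rw [hdm]
  simp only [hcol, pvRowA_map, List.map_map]
  rfl

-- each strided pass of B equals the corresponding stride-3 sublist of the flat vector list
theorem comp_eq (m1 m2 : List (List Int)) (t : Nat) :
    (PySem.List.pyRange (↑t) ((m1.length : Int) * (m1.length : Int)) 3).map (pvVec m1 m2) =
      pvEvery3 (((List.range (m1.length * m1.length)).map (pvIdxRow m1 m2)).drop t) := by
  set n := m1.length with hn
  set N := n * n with hN
  have hcast : ((n : Int) * (n : Int)) = ((N : Nat) : Int) := by rw [hN]; push_cast; ring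
  rw [hcast, PySem.List.pyRange_of_pos _ _ (by norm_num : (0:Int) < 3), every3_getD]
  have hlen : (((List.range N).map (pvIdxRow m1 m2)).drop t).length = N - t := by simp
  rw [hlen]
  have hcnt : (if (↑t : Int) < ↑N then (((↑N : Int) - ↑t + 3 - 1) / 3).toNat else 0)
      = (N - t + 2) / 3 := by
    by_cases h : t < N
    · rw [if_pos (by exact_mod_cast h)]; omega
    · rw [if_neg (by exact_mod_cast h)]; omega
  rw [hcnt, List.map_map]
  apply List.map_congr_left
  intro i hi
  have hiN : t + 3 * i < N := by
    have := List.mem_range.mp hi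
    omega
  simp only [Function.comp_apply]
  have harg : ((↑t : Int) + 3 * ↑i) = ((t + 3 * i : Nat) : Int) := by push_cast; ring
  rw [harg, pvVec_eq m1 m2 _ (by omega)]
  have : (((List.range N).map (pvIdxRow m1 m2)).drop t).getD (3 * i) []
      = pvIdxRow m1 m2 (t + 3 * i) := by
    simp [List.getD, List.getElem?_drop, List.getElem?_map,
      List.getElem?_range hiN]
  rw [this]

-- ===== VERDICT (by name: the statement is the Claim_ definition above) =====
theorem multiplica_mat_spec : Claim_equal_multiplica_mat := by
  intro m1 m2 _ _
  simp only [Spec_multiplica_mat, multiplica_mat, multiplica_mat_alt]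
  rw [foldl_nest _ _ pvDealA (fun v n_lin => pvRowA m1 m2 v n_lin)]
  have hL : (PySem.List.pyRange 0 (m1.length : Int) 1).flatMap
      (fun v => (PySem.List.pyRange 0 (m1.length : Int) 1).map (pvRowA m1 m2 v)) =
      (List.range (m1.length * m1.length)).map (pvIdxRow m1 m2) := by
    rw [PySem.List.pyRange_zero_natCast]
    simp only [List.flatMap_map, List.map_map]
    simpa [pvIdxRow] using
      flat_idx (fun vn yn => pvRowA m1 m2 (↑vn) (↑yn)) m1.length m1.length
  rw [hL]
  have h := deal_spec ((List.range (m1.length * m1.length)).map (pvIdxRow m1 m2)) [] [] [] 0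
  have h0 := comp_eq m1 m2 0
  have h1 := comp_eq m1 m2 1
  have h2 := comp_eq m1 m2 2
  norm_num at h h0 h1 h2
  rw [h]
  exact Prod.ext h0.symm (Prod.ext h1.symm h2.symm)
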